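-- pv_equiv track=rewrite | github.com/uutils/coreutils | util/analyze-gnu-results.py | analyze_test_results
-- ===== SOURCE A (Python) =====
-- def analyze_test_results(json_data):
--     """
--     Analyze test results from GNU test suite JSON data.
--     Counts PASS, FAIL, SKIP results for all tests.
--     """
--     # Counters for test results
--     total_tests = 0
--     pass_count = 0
--     fail_count = 0
--     skip_count = 0
--     xpass_count = 0  # Not in JSON data but included for compatibility
--     error_count = 0  # Not in JSON data but included for compatibility
--
--     # Analyze each utility's tests
--     for utility, tests in json_data.items():
--         for test_name, result in tests.items():
--             total_tests += 1
--
--             match result: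
--                 case "PASS":
--                     pass_count += 1
--                 case "FAIL":
--                     fail_count += 1
--                 case "SKIP":
--                     skip_count += 1
--                 case "ERROR":
--                     error_count += 1
--                 case "XPASS":
--                     xpass_count += 1
--
--     # Return the statistics
--     return {
--         "TOTAL": total_tests,
--         "PASS": pass_count,
--         "FAIL": fail_count,
--         "SKIP": skip_count,
--         "XPASS": xpass_count,
--         "ERROR": error_count,
--     }
-- ===== SOURCE B (Python) =====
-- LABELS = ("PASS", "FAIL", "SKIP", "XPASS", "ERROR")
--
-- def analyze_test_results(json_data):
--     # Stage 1: flatten every result string into one list (no counting here).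
--     results = [r for tests in json_data.values() for r in tests.values()]
--     # Stage 2: TOTAL is the list's length; each category is a separate count scan.
--     stats = {"TOTAL": len(results)}
--     for label in LABELS:
--         stats[label] = results.count(label)
--     return stats
-- ===== Notes on version B (the rewrite author's own statement) =====
-- stated objective: simpler
-- what changed: B replaces A's single nested pass with six scalar accumulators and a match dispatch by staged passes: it first flattens all result strings into one list, then reads TOTAL as the list length and each of the five categories by an independent list.count scan, so there is no accumulator state and no branching at all.
import Mathlib
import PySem

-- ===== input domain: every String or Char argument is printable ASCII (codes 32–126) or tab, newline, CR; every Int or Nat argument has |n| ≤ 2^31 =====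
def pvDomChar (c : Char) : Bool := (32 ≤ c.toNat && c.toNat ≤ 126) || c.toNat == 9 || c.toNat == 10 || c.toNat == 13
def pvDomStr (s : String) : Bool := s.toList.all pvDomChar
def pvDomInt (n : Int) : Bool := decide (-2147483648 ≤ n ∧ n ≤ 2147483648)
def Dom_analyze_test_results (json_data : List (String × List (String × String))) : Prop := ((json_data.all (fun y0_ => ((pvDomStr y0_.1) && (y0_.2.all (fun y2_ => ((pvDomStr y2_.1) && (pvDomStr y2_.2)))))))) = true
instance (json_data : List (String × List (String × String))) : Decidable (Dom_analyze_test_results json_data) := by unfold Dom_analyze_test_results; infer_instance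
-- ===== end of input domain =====

-- B replaces A's accumulator pass + match dispatch by staged passes: flatten all results,
-- then TOTAL = length and each category an independent count scan; objective: simpler.

-- ===== PORT A =====
-- A's match/case on the result string, transliterated as the equality chain it denotes.
def pvStepA (st : Int × Int × Int × Int × Int × Int) (result : String) :
    Int × Int × Int × Int × Int × Int :=
  let t := st.1 + 1
  let pa := st.2.1; let f := st.2.2.1; let s := st.2.2.2.1
  let x := st.2.2.2.2.1; let e := st.2.2.2.2.2
  if result = "PASS" then (t, pa + 1, f, s, x, e)
  else if result = "FAIL" then (t, pa, f + 1, s, x, e)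
  else if result = "SKIP" then (t, pa, f, s + 1, x, e)
  else if result = "ERROR" then (t, pa, f, s, x, e + 1)
  else if result = "XPASS" then (t, pa, f, s, x + 1, e)
  else (t, pa, f, s, x, e)

def analyze_test_results (json_data : List (String × List (String × String))) : List (String × Int) :=
  let st := json_data.foldl (fun st p => p.2.foldl (fun st q => pvStepA st q.2) st)
      ((0, 0, 0, 0, 0, 0) : Int × Int × Int × Int × Int × Int)
  [("TOTAL", st.1), ("PASS", st.2.1), ("FAIL", st.2.2.1), ("SKIP", st.2.2.2.1),
   ("XPASS", st.2.2.2.2.1), ("ERROR", st.2.2.2.2.2)]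

-- ===== PORT B =====
def pvLabels : List String := ["PASS", "FAIL", "SKIP", "XPASS", "ERROR"]

def analyze_test_results_alt (json_data : List (String × List (String × String))) : List (String × Int) :=
  let results := json_data.flatMap (fun p => p.2.map (·.2))
  pvLabels.foldl (fun stats label => stats ++ [(label, (results.count label : Int))])
    [("TOTAL", (results.length : Int))]

-- ===== PRECONDITION & SPEC =====
def Spec_analyze_test_results (json_data : List (String × List (String × String))) (out : List (String × Int)) : Prop := out = analyze_test_results_alt json_data
instance (json_data : List (String × List (String × String))) (out : List (String × Int)) : Decidable (Spec_analyze_test_results json_data out) := by unfold Spec_analyze_test_results; infer_instance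

-- ===== CLAIM (what is proved, stated in full; the proofs are below) =====
def Claim_equal_analyze_test_results : Prop := ∀ (json_data : List (String × List (String × String))), Dom_analyze_test_results json_data → Spec_analyze_test_results json_data (analyze_test_results json_data)

-- ===== LEMMAS AND PROOFS =====

-- Flatten the nested fold over utilities/tests into one fold over the list of result strings.
theorem foldl_nested_flat {α : Type} (f : α → String → α)
    (l : List (String × List (String × String))) (a : α) :
    l.foldl (fun a p => p.2.foldl (fun a q => f a q.2) a) a
      = (l.flatMap (fun p => p.2.map (·.2))).foldl f a := by
  induction l generalizing a with
  | nil => rfl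
  | cons p l ih =>
    simp only [List.foldl_cons, List.flatMap_cons, List.foldl_append, ih, List.foldl_map]

-- A's fold adds the length and the per-label counts to the starting state.
theorem foldA_counts (rs : List String) (st : Int × Int × Int × Int × Int × Int) :
    rs.foldl pvStepA st
      = (st.1 + rs.length, st.2.1 + rs.count "PASS", st.2.2.1 + rs.count "FAIL",
         st.2.2.2.1 + rs.count "SKIP", st.2.2.2.2.1 + rs.count "XPASS",
         st.2.2.2.2.2 + rs.count "ERROR") := by
  induction rs generalizing st with
  | nil => simp
  | cons r rs ih =>
    obtain ⟨t, pa, f, s, x, e⟩ := st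
    rw [List.foldl_cons, ih]
    simp only [pvStepA, List.count_cons, List.length_cons, beq_iff_eq]
    split_ifs with h1 h2 h3 h4 h5 <;> simp_all <;> omega

-- ===== VERDICT (by name: the statement is the Claim_ definition above) =====
theorem analyze_test_results_spec : Claim_equal_analyze_test_results := by
  intro json_data _
  unfold Spec_analyze_test_results analyze_test_results analyze_test_results_alt
  rw [foldl_nested_flat pvStepA, foldA_counts]
  simp [pvLabels]
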